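-- pv_equiv track=rewrite | github.com/CODeRUS/rates-api | cash_report.py | parse_cash_sources_str
-- ===== SOURCE A (Python) =====
-- from typing import Any, Dict, List, Optional, Tuple
--
-- def parse_cash_sources_str(spec: str) -> Tuple[bool, bool, bool]:
--     """
--     ``all`` или список через запятую: ``rbc``, ``banki``, ``vbr``
--     → флаги (use_rbc, use_banki, use_vbr).
--     """
--     s = spec.strip().lower().replace(" ", "")
--     if not s or s == "all":
--         return True, True, True
--     parts = [p for p in s.split(",") if p]
--     valid = frozenset({"rbc", "banki", "vbr"})
--     for p in parts:
--         if p not in valid: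
--             raise ValueError(f"неизвестный источник наличных: {p}")
--     return ("rbc" in parts, "banki" in parts, "vbr" in parts)
-- ===== SOURCE B (Python) =====
-- def parse_cash_sources_str(spec):
--     """Recursive-descent tokenizer: consume the string one comma-delimited
--     token at a time (find + slice), no split(), no parts list, no membership
--     scans; flags accumulate through the recursion."""
--     s = spec.strip().lower().replace(" ", "")
--     if not s or s == "all":
--         return True, True, True
--     return _sources(s, False, False, False)
--
--
-- def _sources(s, rbc, banki, vbr):
--     if not s:
--         return rbc, banki, vbr
--     i = s.find(",")
--     if i < 0:
--         tok, rest = s, ""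
--     else:
--         tok, rest = s[:i], s[i + 1:]
--     if tok == "rbc":
--         return _sources(rest, True, banki, vbr)
--     if tok == "banki":
--         return _sources(rest, rbc, True, vbr)
--     if tok == "vbr":
--         return _sources(rest, rbc, banki, True)
--     if tok:
--         raise ValueError(f"неизвестный источник наличных: {tok}")
--     return _sources(rest, rbc, banki, vbr)
-- ===== Notes on version B (the rewrite author's own statement) =====
-- stated objective: alternative
-- what changed: Replaces A's split-into-a-list + validation loop + three membership scans by a recursive-descent tokenizer that consumes the string one comma-delimited token at a time (find + slice) and threads the three flags through the recursion, never materialising a parts list.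
import Mathlib
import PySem

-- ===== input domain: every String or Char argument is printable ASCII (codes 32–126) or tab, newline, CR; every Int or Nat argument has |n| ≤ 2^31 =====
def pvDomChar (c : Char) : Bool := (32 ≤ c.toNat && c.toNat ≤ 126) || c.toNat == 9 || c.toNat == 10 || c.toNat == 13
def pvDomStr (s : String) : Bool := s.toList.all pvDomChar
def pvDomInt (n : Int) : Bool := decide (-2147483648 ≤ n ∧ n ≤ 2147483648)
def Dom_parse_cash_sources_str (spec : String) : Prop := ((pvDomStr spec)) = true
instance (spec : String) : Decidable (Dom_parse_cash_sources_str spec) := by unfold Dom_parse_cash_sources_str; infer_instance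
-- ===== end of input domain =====

-- B replaces A's split-into-a-list + validation loop + three membership scans by a
-- recursive-descent tokenizer consuming one comma-delimited token at a time,
-- threading the three flags through the recursion (objective: alternative).
-- A raises ValueError on an unknown non-empty part; those inputs are excluded by Pre_ (B raises there too).


-- ===== PORT A =====
def parse_cash_sources_str (spec : String) : Bool × Bool × Bool :=
  let s := PySem.Str.replace (PySem.Str.lower (PySem.Str.strip spec)) " " ""
  if s = "" ∨ s = "all" then (true, true, true)
  else
    let parts : List String := ((PySem.Str.split? s ",").getD []).filter (fun p => p ≠ "")
    let valid := ["rbc", "banki", "vbr"]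
    if parts.all (fun p => valid.contains p) then
      (parts.contains "rbc", parts.contains "banki", parts.contains "vbr")
    else (false, false, false)  -- A raises ValueError here; excluded by Pre_

-- ===== PORT B =====
-- B's recursive helper _sources: tok = s[:i], rest = s[i+1:] with i = s.find(",")
-- (here tok = takeWhile (≠ ','), rest = drop (tok.length+1) — the same values, exact)
def pvSources (cs : List Char) (r b v : Bool) : Option (Bool × Bool × Bool) :=
  match h : cs with
  | [] => some (r, b, v)
  | _ :: _ =>
    let tok := cs.takeWhile (· ≠ ',')
    let rest := cs.drop (tok.length + 1)
    if tok = "rbc".toList then pvSources rest true b v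
    else if tok = "banki".toList then pvSources rest r true v
    else if tok = "vbr".toList then pvSources rest r b true
    else if tok ≠ [] then none  -- B raises ValueError here; excluded by Pre_
    else pvSources rest r b v
termination_by cs.length
decreasing_by all_goals
  (subst h; simp only [List.length_drop, List.length_cons]; omega)

def parse_cash_sources_str_alt (spec : String) : Bool × Bool × Bool :=
  let s := PySem.Str.replace (PySem.Str.lower (PySem.Str.strip spec)) " " ""
  if s = "" ∨ s = "all" then (true, true, true)
  else
    match pvSources s.toList false false false with
    | some t => t
    | none => (false, false, false)  -- raising case, outside Pre_

-- ===== PRECONDITION & SPEC =====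
-- Pre_ excludes exactly the inputs where A raises ValueError: some non-empty
-- comma-separated part of the preprocessed string is not a known source name.
def Pre_parse_cash_sources_str (spec : String) : Prop :=
  let s := PySem.Str.replace (PySem.Str.lower (PySem.Str.strip spec)) " " ""
  s = "" ∨ s = "all" ∨
    ∀ p ∈ (PySem.Str.split? s ",").getD [], p = "" ∨ p = "rbc" ∨ p = "banki" ∨ p = "vbr"
instance (spec : String) : Decidable (Pre_parse_cash_sources_str spec) := by
  unfold Pre_parse_cash_sources_str; infer_instance

def pvWitness_parse_cash_sources_str : String := "rbc, banki"

def Spec_parse_cash_sources_str (spec : String) (out : Bool × Bool × Bool) : Prop := out = parse_cash_sources_str_alt spec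
instance (spec : String) (out : Bool × Bool × Bool) : Decidable (Spec_parse_cash_sources_str spec out) := by unfold Spec_parse_cash_sources_str; infer_instance

-- ===== CLAIM (what is proved, stated in full; the proofs are below) =====
def Claim_equal_parse_cash_sources_str : Prop := ∀ (spec : String), Dom_parse_cash_sources_str spec → Pre_parse_cash_sources_str spec → Spec_parse_cash_sources_str spec (parse_cash_sources_str spec)

-- ===== LEMMAS AND PROOFS =====

-- the token list B's recursion walks through (proof-only abstraction of pvSources' traversal)
def pvTok (cs : List Char) : List (List Char) :=
  match h : cs with
  | [] => []
  | _ :: _ => cs.takeWhile (· ≠ ',') :: pvTok (cs.drop ((cs.takeWhile (· ≠ ',')).length + 1))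
termination_by cs.length
decreasing_by
  subst h; simp only [List.length_drop, List.length_cons]; omega


-- mirror of PySem.Chars.splitOn.go on the single-character separator ","
def pvSplit : List Char → List Char → List (List Char)
  | [], cur => [cur.reverse]
  | c :: rest, cur => if c = ',' then cur.reverse :: pvSplit rest [] else pvSplit rest (c :: cur)

lemma pvGo_single : ∀ fuel l cur acc, l.length < fuel →
    PySem.Chars.splitOn.go [','] fuel l cur acc = acc.reverse ++ pvSplit l cur := by
  intro fuel
  induction fuel with
  | zero => intro l cur acc h; omega
  | succ n ih =>
    intro l cur acc h
    match l with
    | [] => rw [PySem.Chars.splitOn.go]; simp [pvSplit]; omega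
    | c :: rest =>
      rw [PySem.Chars.splitOn.go]
      by_cases hc : c = ','
      · subst hc
        simp only [List.isPrefixOf, BEq.rfl, Bool.true_and, if_pos, List.length_cons,
          List.drop_succ_cons, List.length_nil, List.drop_zero]
        rw [ih rest [] (cur.reverse :: acc) (by simp at h; omega)]
        simp [pvSplit]
      · rw [if_neg (by simp [List.isPrefixOf]; intro hh; exact hc hh.symm)]
        rw [ih rest (c :: cur) acc (by simp at h; omega)]
        simp [pvSplit, hc]

lemma pvSplitOn_single (cs : List Char) : PySem.Chars.splitOn cs [','] = pvSplit cs [] := by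
  have := pvGo_single (cs.length + 1) cs [] [] (by omega)
  simpa [PySem.Chars.splitOn] using this

lemma pvDrop_tok (cs : List Char) :
    cs.drop ((cs.takeWhile (· ≠ ',')).length + 1) = (cs.dropWhile (· ≠ ',')).drop 1 := by
  have h := List.takeWhile_append_dropWhile (p := fun x => decide (x ≠ ',')) (l := cs)
  set t := cs.takeWhile (· ≠ ',') with ht
  set d := cs.dropWhile (· ≠ ',') with hd
  calc cs.drop (t.length + 1) = (t ++ d).drop (t.length + 1) := by rw [h]
    _ = d.drop 1 := List.drop_length_add_append 1

lemma pvSplit_eq : ∀ cs cur, pvSplit cs cur =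
    (cur.reverse ++ cs.takeWhile (· ≠ ',')) ::
      (match cs.dropWhile (· ≠ ',') with | [] => [] | _ :: r => pvSplit r []) := by
  intro cs
  induction cs with
  | nil => intro cur; simp [pvSplit]
  | cons c rest ih =>
    intro cur
    by_cases hc : c = ','
    · subst hc; simp [pvSplit]
    · simp only [pvSplit, if_neg hc, ih (c :: cur), List.takeWhile_cons, List.dropWhile_cons]
      simp [hc]

lemma pvSplit_filter (cs : List Char) :
    (pvSplit cs []).filter (· ≠ []) = (pvTok cs).filter (· ≠ []) := by
  induction cs using pvTok.induct with
  | case1 => simp [pvSplit, pvTok]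
  | case2 c rest ih =>
    rw [pvSplit_eq, pvTok, pvDrop_tok]
    rw [pvDrop_tok] at ih
    cases hdw : (c :: rest).dropWhile (· ≠ ',') with
    | nil => rw [hdw] at ih; simp [pvTok]
    | cons d r =>
      rw [hdw] at ih
      simp only [List.drop_succ_cons, List.drop_zero] at ih ⊢
      simp [List.filter_cons]
      split_ifs <;> simp_all

-- B's recursion computes the three membership flags over its (nonempty) tokens
lemma pvSources_eq (cs : List Char)
    (hv : ∀ t ∈ pvTok cs, t = [] ∨ t = "rbc".toList ∨ t = "banki".toList ∨ t = "vbr".toList) :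
    ∀ r b v, pvSources cs r b v =
      some (r || ((pvTok cs).filter (· ≠ [])).contains "rbc".toList,
            b || ((pvTok cs).filter (· ≠ [])).contains "banki".toList,
            v || ((pvTok cs).filter (· ≠ [])).contains "vbr".toList) := by
  induction cs using pvTok.induct with
  | case1 => intro r b v; simp [pvSources, pvTok]
  | case2 c rest ih =>
    intro r b v
    rw [pvSources, pvTok]
    rw [pvTok] at hv
    have htok := hv _ (List.mem_cons_self)
    have htl : ∀ t ∈ pvTok ((c :: rest).drop (((c :: rest).takeWhile (· ≠ ',')).length + 1)),
        t = [] ∨ t = "rbc".toList ∨ t = "banki".toList ∨ t = "vbr".toList := by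
      intro t ht; exact hv t (List.mem_cons_of_mem _ ht)
    have key := ih htl
    rcases htok with h0 | h0 | h0 | h0 <;>
      · rw [h0] at key ⊢
        simp at key ⊢
        cases r <;> cases b <;> cases v <;> simp [key]

lemma pvFilterMap (l : List (List Char)) :
    ((l.map String.ofList).filter (· ≠ "")) = (l.filter (· ≠ [])).map String.ofList := by
  rw [List.filter_map]
  congr 1
  apply List.filter_congr
  intro x _
  have hiff : (String.ofList x = "") ↔ (x = []) :=
    ⟨fun h => by simpa using congrArg String.toList h, by rintro rfl; rfl⟩
  simp [hiff]

lemma pvContainsMap (l : List (List Char)) (t : List Char) :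
    (l.map String.ofList).contains (String.ofList t) = l.contains t := by
  simp
  constructor
  · rintro ⟨x, hx, he⟩
    have : t = x := by have := congrArg String.toList he.symm; simpa using this
    exact this ▸ hx
  · intro h; exact ⟨t, h, rfl⟩

theorem parse_cash_sources_str_spec : Claim_equal_parse_cash_sources_str := by
  intro spec _ hpre
  unfold Spec_parse_cash_sources_str parse_cash_sources_str parse_cash_sources_str_alt
  set s := PySem.Str.replace (PySem.Str.lower (PySem.Str.strip spec)) " " "" with hs
  by_cases hall : s = "" ∨ s = "all"
  · simp [hall]
  · have hv : ∀ p ∈ (PySem.Str.split? s ",").getD [], p = "" ∨ p = "rbc" ∨ p = "banki" ∨ p = "vbr" := by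
      unfold Pre_parse_cash_sources_str at hpre
      rw [← hs] at hpre
      rcases hpre with h | h | h
      · exact absurd (Or.inl h) hall
      · exact absurd (Or.inr h) hall
      · exact h
    have hsplit : (PySem.Str.split? s ",").getD [] = (pvSplit s.toList []).map String.ofList := by
      have hcomma : (",").toList = [','] := rfl
      simp [PySem.Str.split?, PySem.Chars.split?, hcomma, pvSplitOn_single]
    rw [hsplit] at hv
    -- validity transferred to B's token list
    have hvc : ∀ t ∈ pvTok s.toList, t = [] ∨ t = "rbc".toList ∨ t = "banki".toList ∨ t = "vbr".toList := by
      intro t ht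
      by_cases ht0 : t = []
      · exact Or.inl ht0
      · have htf : t ∈ (pvTok s.toList).filter (· ≠ []) := by
          simp [List.mem_filter, ht, ht0]
        rw [← pvSplit_filter] at htf
        have htm : t ∈ pvSplit s.toList [] := (List.mem_filter.mp htf).1
        have := hv (String.ofList t) (List.mem_map_of_mem htm)
        rcases this with h | h | h | h
        · exact absurd (by simpa using congrArg String.toList h) ht0
        · exact Or.inr (Or.inl (by simpa using congrArg String.toList h))
        · exact Or.inr (Or.inr (Or.inl (by simpa using congrArg String.toList h)))
        · exact Or.inr (Or.inr (Or.inr (by simpa using congrArg String.toList h)))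
    simp only [hall, if_false, hsplit, pvFilterMap, pvSplit_filter]
    rw [pvSources_eq s.toList hvc false false false]
    -- A's validation guard holds
    have hguard : (((pvTok s.toList).filter (· ≠ [])).map String.ofList).all
        (fun p => (["rbc", "banki", "vbr"] : List String).contains p) = true := by
      rw [List.all_eq_true]
      intro p hp
      rcases List.mem_map.mp hp with ⟨t, htmem, rfl⟩
      have ht0 : t ≠ [] := by simpa using (List.mem_filter.mp htmem).2
      rcases hvc t (List.mem_filter.mp htmem).1 with h | h | h | h
      · exact absurd h ht0
      · subst h; decide
      · subst h; decide
      · subst h; decide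
    rw [if_pos hguard]
    have h1 := pvContainsMap ((pvTok s.toList).filter (· ≠ [])) "rbc".toList
    have h2 := pvContainsMap ((pvTok s.toList).filter (· ≠ [])) "banki".toList
    have h3 := pvContainsMap ((pvTok s.toList).filter (· ≠ [])) "vbr".toList
    have e1 : String.ofList "rbc".toList = "rbc" := rfl
    have e2 : String.ofList "banki".toList = "banki" := rfl
    have e3 : String.ofList "vbr".toList = "vbr" := rfl
    rw [e1] at h1; rw [e2] at h2; rw [e3] at h3
    simp only [Bool.false_or]
    rw [h1, h2, h3]
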